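-- pv_equiv track=rewrite | github.com/ehrlich-b/research | verification/area_law_verification.py | boundary_count_arbitrary
-- ===== SOURCE A (Python) =====
-- def boundary_count_arbitrary(sites, Lx=4, Ly=4):
--     """Count boundary bonds for arbitrary site subset on Lx x Ly PBC lattice."""
--     sites_set = set(sites)
--     count = 0
--     for x in range(Lx):
--         for y in range(Ly):
--             site = x * Ly + y
--             if site not in sites_set:
--                 continue
--             # Check horizontal neighbor
--             nbr_h = ((x + 1) % Lx) * Ly + y
--             if nbr_h not in sites_set:
--                 count += 1
--             # Check vertical neighbor
--             nbr_v = x * Ly + ((y + 1) % Ly)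
--             if nbr_v not in sites_set:
--                 count += 1
--             # Also check reverse directions (bonds from outside to inside)
--     # We also need bonds from outside pointing in
--     complement = set(range(Lx * Ly)) - sites_set
--     for x in range(Lx):
--         for y in range(Ly):
--             site = x * Ly + y
--             if site not in complement:
--                 continue
--             nbr_h = ((x + 1) % Lx) * Ly + y
--             if nbr_h in sites_set:
--                 count += 1
--             nbr_v = x * Ly + ((y + 1) % Ly)
--             if nbr_v in sites_set:
--                 count += 1
--     return count
-- ===== SOURCE B (Python) =====
-- def boundary_count_arbitrary(sites, Lx=4, Ly=4):
--     """Count boundary bonds for arbitrary site subset on Lx x Ly PBC lattice."""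
--     sites_set = set(sites)
--     count = 0
--     for x in range(Lx):
--         for y in range(Ly):
--             site = x * Ly + y
--             nbr_h = ((x + 1) % Lx) * Ly + y
--             nbr_v = x * Ly + ((y + 1) % Ly)
--             inside = site in sites_set
--             count += (inside != (nbr_h in sites_set)) + (inside != (nbr_v in sites_set))
--     return count
-- ===== Notes on version B (the rewrite author's own statement) =====
-- stated objective: simpler
-- what changed: Replaces A's two full grid scans (inside-to-outside bonds, then an explicitly built complement set scanned for outside-to-inside bonds) with a single grid pass that counts each bond once whenever its two endpoints differ in membership (XOR), eliminating the complement set entirely.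
import Mathlib
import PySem

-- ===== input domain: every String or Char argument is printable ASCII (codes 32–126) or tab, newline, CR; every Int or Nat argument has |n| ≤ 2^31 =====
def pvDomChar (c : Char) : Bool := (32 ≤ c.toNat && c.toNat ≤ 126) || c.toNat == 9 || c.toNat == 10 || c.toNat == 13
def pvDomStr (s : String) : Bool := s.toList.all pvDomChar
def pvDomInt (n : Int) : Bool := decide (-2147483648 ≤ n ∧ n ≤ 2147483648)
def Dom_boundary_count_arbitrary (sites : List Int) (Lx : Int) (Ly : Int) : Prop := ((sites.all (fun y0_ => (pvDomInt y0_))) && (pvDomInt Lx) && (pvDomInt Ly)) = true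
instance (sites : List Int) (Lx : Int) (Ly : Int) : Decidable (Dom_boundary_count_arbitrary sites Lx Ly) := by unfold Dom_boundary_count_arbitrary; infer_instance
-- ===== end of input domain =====

-- B fuses A's two grid scans into one pass counting each bond whose endpoints differ in membership; the complement set disappears. Same complexity; return value unchanged.

-- ===== PORT A =====
def boundary_count_arbitrary (sites : List Int) (Lx : Int) (Ly : Int) : Int :=
  let sites_set : PySem.Set Int := PySem.Set.ofList sites
  let count : Int :=
    (PySem.List.pyRange 0 Lx 1).foldl (fun c x =>
      (PySem.List.pyRange 0 Ly 1).foldl (fun c y =>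
        let site := x * Ly + y
        if PySem.Set.contains sites_set site then
          let nbr_h := (PySem.Int.mod (x + 1) Lx) * Ly + y
          let c := if PySem.Set.contains sites_set nbr_h then c else c + 1
          let nbr_v := x * Ly + PySem.Int.mod (y + 1) Ly
          if PySem.Set.contains sites_set nbr_v then c else c + 1
        else c) c) 0
  let complement : PySem.Set Int :=
    PySem.Set.diff (PySem.Set.ofList (PySem.List.pyRange 0 (Lx * Ly) 1)) sites_set
  (PySem.List.pyRange 0 Lx 1).foldl (fun c x =>
    (PySem.List.pyRange 0 Ly 1).foldl (fun c y =>
      let site := x * Ly + y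
      if PySem.Set.contains complement site then
        let nbr_h := (PySem.Int.mod (x + 1) Lx) * Ly + y
        let c := if PySem.Set.contains sites_set nbr_h then c + 1 else c
        let nbr_v := x * Ly + PySem.Int.mod (y + 1) Ly
        if PySem.Set.contains sites_set nbr_v then c + 1 else c
      else c) c) count

-- ===== PORT B =====
def boundary_count_arbitrary_alt (sites : List Int) (Lx : Int) (Ly : Int) : Int :=
  let sites_set : PySem.Set Int := PySem.Set.ofList sites
  (PySem.List.pyRange 0 Lx 1).foldl (fun c x =>
    (PySem.List.pyRange 0 Ly 1).foldl (fun c y =>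
      let site := x * Ly + y
      let nbr_h := (PySem.Int.mod (x + 1) Lx) * Ly + y
      let nbr_v := x * Ly + PySem.Int.mod (y + 1) Ly
      let inside := PySem.Set.contains sites_set site
      c + ((if inside != PySem.Set.contains sites_set nbr_h then 1 else 0)
         + (if inside != PySem.Set.contains sites_set nbr_v then 1 else 0))) c) 0

-- ===== PRECONDITION & SPEC =====
def Spec_boundary_count_arbitrary (sites : List Int) (Lx : Int) (Ly : Int) (out : Int) : Prop := out = boundary_count_arbitrary_alt sites Lx Ly
instance (sites : List Int) (Lx : Int) (Ly : Int) (out : Int) : Decidable (Spec_boundary_count_arbitrary sites Lx Ly out) := by unfold Spec_boundary_count_arbitrary; infer_instance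

-- ===== CLAIM (what is proved, stated in full; the proofs are below) =====
def Claim_equal_boundary_count_arbitrary : Prop := ∀ (sites : List Int) (Lx : Int) (Ly : Int), Dom_boundary_count_arbitrary sites Lx Ly → Spec_boundary_count_arbitrary sites Lx Ly (boundary_count_arbitrary sites Lx Ly)

-- ===== LEMMAS AND PROOFS =====

-- a fold whose body only adds a per-element amount is the initial value plus the sum of those amounts
theorem pv_fold_body {α : Type} (l : List α) (f : Int → α → Int) (g : α → Int) (c : Int)
    (h : ∀ c x, f c x = c + g x) : l.foldl f c = c + (l.map g).sum := by
  induction l generalizing c with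
  | nil => simp
  | cons a t ih => simp only [List.foldl_cons, List.map_cons, List.sum_cons, h, ih]; ring

-- sum of two per-element sums equals the sum of the combined per-element function, given pointwise agreement on the list
theorem pv_sum_combine {α : Type} (l : List α) (f g h : α → Int)
    (hp : ∀ x ∈ l, f x + g x = h x) :
    (l.map f).sum + (l.map g).sum = (l.map h).sum := by
  induction l with
  | nil => simp
  | cons a t ih =>
    simp only [List.map_cons, List.sum_cons]
    have h1 := hp a (by simp)
    have h2 := ih (fun x hx => hp x (by simp [hx]))
    omega

-- two nested grid folds, run one after the other, equal a single fused nested fold,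
-- provided each body just adds a per-cell amount and the per-cell amounts combine on the grid
theorem pv_main (X Y : List Int) (bA1 bA2 bB : Int → Int → Int → Int)
    (g1 g2 gB : Int → Int → Int)
    (h1 : ∀ c x y, bA1 c x y = c + g1 x y)
    (h2 : ∀ c x y, bA2 c x y = c + g2 x y)
    (hB : ∀ c x y, bB c x y = c + gB x y)
    (hcell : ∀ x ∈ X, ∀ y ∈ Y, g1 x y + g2 x y = gB x y) :
    X.foldl (fun c x => Y.foldl (fun c y => bA2 c x y) c)
      (X.foldl (fun c x => Y.foldl (fun c y => bA1 c x y) c) 0)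
    = X.foldl (fun c x => Y.foldl (fun c y => bB c x y) c) 0 := by
  have e1 := pv_fold_body X _ (fun x => (Y.map (g1 x)).sum) 0
    (fun c x => pv_fold_body Y _ (g1 x) c (fun c y => h1 c x y))
  have e2 := pv_fold_body X _ (fun x => (Y.map (g2 x)).sum)
    (X.foldl (fun c x => Y.foldl (fun c y => bA1 c x y) c) 0)
    (fun c x => pv_fold_body Y _ (g2 x) c (fun c y => h2 c x y))
  have eB := pv_fold_body X _ (fun x => (Y.map (gB x)).sum) 0
    (fun c x => pv_fold_body Y _ (gB x) c (fun c y => hB c x y))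
  rw [e2, e1, eB]
  have := pv_sum_combine X (fun x => (Y.map (g1 x)).sum) (fun x => (Y.map (g2 x)).sum)
    (fun x => (Y.map (gB x)).sum)
    (fun x hx => pv_sum_combine Y (g1 x) (g2 x) (gB x) (fun y hy => hcell x hx y hy))
  omega

-- ===== VERDICT (by name: the statement is the Claim_ definition above) =====
theorem boundary_count_arbitrary_spec : Claim_equal_boundary_count_arbitrary := by
  intro sites Lx Ly _
  unfold Spec_boundary_count_arbitrary boundary_count_arbitrary boundary_count_arbitrary_alt
  dsimp only
  refine pv_main (PySem.List.pyRange 0 Lx 1) (PySem.List.pyRange 0 Ly 1) _ _ _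
    (fun x y => if PySem.Set.contains (PySem.Set.ofList sites) (x * Ly + y) then
        (if PySem.Set.contains (PySem.Set.ofList sites) ((PySem.Int.mod (x + 1) Lx) * Ly + y) then 0 else 1)
      + (if PySem.Set.contains (PySem.Set.ofList sites) (x * Ly + PySem.Int.mod (y + 1) Ly) then 0 else 1) else 0)
    (fun x y => if PySem.Set.contains (PySem.Set.diff (PySem.Set.ofList (PySem.List.pyRange 0 (Lx * Ly) 1)) (PySem.Set.ofList sites)) (x * Ly + y) then
        (if PySem.Set.contains (PySem.Set.ofList sites) ((PySem.Int.mod (x + 1) Lx) * Ly + y) then 1 else 0)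
      + (if PySem.Set.contains (PySem.Set.ofList sites) (x * Ly + PySem.Int.mod (y + 1) Ly) then 1 else 0) else 0)
    (fun x y => (if PySem.Set.contains (PySem.Set.ofList sites) (x * Ly + y) != PySem.Set.contains (PySem.Set.ofList sites) ((PySem.Int.mod (x + 1) Lx) * Ly + y) then 1 else 0)
      + (if PySem.Set.contains (PySem.Set.ofList sites) (x * Ly + y) != PySem.Set.contains (PySem.Set.ofList sites) (x * Ly + PySem.Int.mod (y + 1) Ly) then 1 else 0))
    ?_ ?_ ?_ ?_
  · intro c x y; dsimp only; split_ifs <;> ring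
  · intro c x y; dsimp only; split_ifs <;> ring
  · intro c x y; rfl
  · intro x hx y hy
    rw [PySem.List.mem_pyRange_one] at hx hy
    have hsite_mem : (x * Ly + y) ∈ PySem.List.pyRange 0 (Lx * Ly) 1 := by
      rw [PySem.List.mem_pyRange_one]
      refine ⟨?_, ?_⟩
      · nlinarith [hx.1, hx.2, hy.1, hy.2]
      · nlinarith [hx.1, hx.2, hy.1, hy.2]
    have hdiff : PySem.Set.contains (PySem.Set.diff (PySem.Set.ofList (PySem.List.pyRange 0 (Lx * Ly) 1)) (PySem.Set.ofList sites)) (x * Ly + y)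
        = !(PySem.Set.contains (PySem.Set.ofList sites) (x * Ly + y)) := by
      cases hA : PySem.Set.contains (PySem.Set.ofList sites) (x * Ly + y) with
      | false =>
        simp only [Bool.not_false]
        rw [PySem.Set.contains_iff, PySem.Set.mem_diff]
        refine ⟨(PySem.Set.mem_ofList _ _).mpr hsite_mem, fun hmem => ?_⟩
        have hcontr : (PySem.Set.ofList sites).contains (x * Ly + y) = true :=
          (PySem.Set.contains_iff _ _).mpr hmem
        rw [hA] at hcontr; exact Bool.noConfusion hcontr
      | true =>
        simp only [Bool.not_true]
        rw [← Bool.not_eq_true, PySem.Set.contains_iff, PySem.Set.mem_diff]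
        intro hc
        exact hc.2 ((PySem.Set.contains_iff _ _).mp hA)
    dsimp only
    rw [hdiff]
    cases PySem.Set.contains (PySem.Set.ofList sites) (x * Ly + y) <;>
      cases PySem.Set.contains (PySem.Set.ofList sites) ((PySem.Int.mod (x + 1) Lx) * Ly + y) <;>
      cases PySem.Set.contains (PySem.Set.ofList sites) (x * Ly + PySem.Int.mod (y + 1) Ly) <;> simp
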